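-- pv_equiv track=rewrite | github.com/bmoretz/Daily-Coding-Problem | py/dcp/problems/sorting/peaks_valleys.py | alt_sort1
-- ===== SOURCE A (Python) =====
-- def alt_sort1(arr):
--
--     if arr == None: return None
--
--     n = len(arr)
--
--     if n == 0: return []
--
--     s = list(reversed(sorted(arr)))
--
--     mid = n//2
--
--     high, low = s[:mid], list(reversed(s[mid:]))
--     h, l = 0, 0
--
--     result = []
--
--     while h < len(high) or l < len(low):
--
--         if h < len(high):
--             result.append(high[h])
--             h += 1
--
--         if l < len(low):
--             result.append(low[l])
--             l += 1
--
--     return result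
-- ===== SOURCE B (Python) =====
-- def alt_sort1(arr):
--     if arr == None: return None
--     s = sorted(arr)[::-1]
--     n = len(s)
--     return [s[i // 2] if i % 2 == 0 else s[n - 1 - i // 2] for i in range(n)]
-- ===== Notes on version B (the rewrite author's own statement) =====
-- stated objective: simpler
-- what changed: A splits the descending sort into two half-lists and merges them with a two-cursor while loop; B drops the halves and the loop entirely and builds the result as a single closed-form index comprehension result[i] = s[i//2] if i is even else s[n-1-i//2].
import Mathlib
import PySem

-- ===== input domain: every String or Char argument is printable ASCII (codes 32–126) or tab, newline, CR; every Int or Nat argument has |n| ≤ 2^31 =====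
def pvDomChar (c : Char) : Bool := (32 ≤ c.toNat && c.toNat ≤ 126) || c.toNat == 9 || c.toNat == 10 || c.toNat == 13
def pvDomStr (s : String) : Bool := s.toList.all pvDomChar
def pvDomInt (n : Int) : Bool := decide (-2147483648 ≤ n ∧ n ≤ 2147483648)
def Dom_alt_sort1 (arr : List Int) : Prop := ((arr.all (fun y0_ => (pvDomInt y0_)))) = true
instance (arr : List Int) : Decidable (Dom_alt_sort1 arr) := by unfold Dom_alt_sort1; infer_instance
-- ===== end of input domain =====

-- B replaces A's split-into-halves-and-merge while loop by a single closed-form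
-- index comprehension over the descending sort (objective: simpler).
-- The Python 'arr == None' guard is outside the List Int domain and not modelled.

-- ===== PORT A =====
-- the while loop: each round appends high[h] if h < len(high), then low[l] if l < len(low);
-- as structural recursion on the two remaining lists, same branch order
def pvInterA : List Int → List Int → List Int
  | [], [] => []
  | h :: hs, [] => h :: pvInterA hs []
  | [], l :: ls => l :: pvInterA [] ls
  | h :: hs, l :: ls => h :: l :: pvInterA hs ls

def alt_sort1 (arr : List Int) : List Int :=
  if arr.length = 0 then []              -- if n == 0: return []
  else
    let s := (PySem.List.sorted arr (fun x => x) false).reverse  -- list(reversed(sorted(arr)))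
    let mid : Int := PySem.Int.floordiv (arr.length : Int) 2     -- mid = n//2
    let high := PySem.List.slice s none (some mid)               -- s[:mid]
    let low := (PySem.List.slice s (some mid) none).reverse      -- list(reversed(s[mid:]))
    pvInterA high low

-- ===== PORT B =====
def alt_sort1_alt (arr : List Int) : List Int :=
  let s := (PySem.List.sorted arr (fun x => x) false).reverse    -- sorted(arr)[::-1]
  let n := s.length
  (PySem.List.pyRange 0 (n : Int) 1).map (fun i =>
    if PySem.Int.mod i 2 = 0 then PySem.List.pyGetD s (PySem.Int.floordiv i 2) 0  -- s[i//2], always in range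
    else PySem.List.pyGetD s ((n : Int) - 1 - PySem.Int.floordiv i 2) 0)          -- s[n-1-i//2], always in range

-- ===== PRECONDITION & SPEC =====
def Spec_alt_sort1 (arr : List Int) (out : List Int) : Prop := out = alt_sort1_alt arr
instance (arr : List Int) (out : List Int) : Decidable (Spec_alt_sort1 arr out) := by unfold Spec_alt_sort1; infer_instance

-- ===== CLAIM (what is proved, stated in full; the proofs are below) =====
def Claim_equal_alt_sort1 : Prop := ∀ (arr : List Int), Dom_alt_sort1 arr → Spec_alt_sort1 arr (alt_sort1 arr)

-- ===== LEMMAS AND PROOFS =====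

-- the pure-Nat closed form of B's comprehension
def pvCF (s : List Int) : List Int :=
  (List.range s.length).map (fun k => if k % 2 = 0 then s.getD (k / 2) 0 else s.getD (s.length - 1 - k / 2) 0)

lemma pvCF_core : ∀ (n : Nat) (s : List Int), s.length = n →
    pvInterA (s.take (s.length / 2)) ((s.drop (s.length / 2)).reverse) = pvCF s := by
  intro n
  induction n using Nat.strong_induction_on with
  | _ n IH =>
    intro s hlen
    match s with
    | [] => simp [pvInterA, pvCF]
    | [x] => simp [pvInterA, pvCF]
    | x :: y :: rest =>
      have hne : (y :: rest) ≠ [] := by simp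
      set t' := (y :: rest).dropLast with ht'
      set b := (y :: rest).getLast hne with hb
      have hsplit : (y :: rest) = t' ++ [b] := (List.dropLast_append_getLast hne).symm
      have hm : t'.length = rest.length := by rw [ht']; simp
      have hlen2 : (x :: y :: rest).length = rest.length + 2 := by simp
      have hmid : (x :: y :: rest).length / 2 = rest.length / 2 + 1 := by omega
      have hdiv : rest.length / 2 ≤ t'.length := by omega
      -- left side peels x (front of high) and b (front of reversed low)
      have hL : pvInterA ((x :: y :: rest).take ((x :: y :: rest).length / 2))
            (((x :: y :: rest).drop ((x :: y :: rest).length / 2)).reverse)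
          = x :: b :: pvInterA (t'.take (t'.length / 2)) ((t'.drop (t'.length / 2)).reverse) := by
        rw [hmid]
        have h1 : (x :: y :: rest).take (rest.length / 2 + 1) = x :: t'.take (rest.length / 2) := by
          rw [List.take_succ_cons]
          conv_lhs => rw [hsplit]
          rw [List.take_append_of_le_length hdiv]
        have h2 : (x :: y :: rest).drop (rest.length / 2 + 1) = t'.drop (rest.length / 2) ++ [b] := by
          rw [List.drop_succ_cons]
          conv_lhs => rw [hsplit]
          rw [List.drop_append_of_le_length hdiv]
        rw [h1, h2, List.reverse_append]
        simp only [List.reverse_singleton, List.singleton_append, pvInterA]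
        rw [hm]
      rw [hL, IH rest.length (by omega) t' (by omega)]
      -- right side: pvCF (x :: y :: rest) = x :: b :: pvCF t'
      unfold pvCF
      rw [hlen2, show rest.length + 2 = 2 + rest.length by omega, List.range_add, List.map_append]
      have hg0 : (List.range 2).map (fun k => if k % 2 = 0
            then (x :: y :: rest).getD (k / 2) 0
            else (x :: y :: rest).getD (2 + rest.length - 1 - k / 2) 0)
          = [x, b] := by
        have hlast : (y :: rest).getD rest.length 0 = b := by
          rw [hsplit, List.getD_append_right _ _ _ _ (by omega)]
          simp [hm]
        have h21 : 2 + rest.length - 1 - 1 / 2 = rest.length + 1 := by omega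
        simp only [List.range_succ, List.range_zero, List.nil_append, List.map_cons,
          List.map_nil, List.cons_append, h21]
        norm_num [List.getD_cons_succ]
        simp [hb, List.getLast_eq_getElem]
      rw [hg0, List.map_map]
      have hrest : (List.range rest.length).map ((fun k => if k % 2 = 0
            then (x :: y :: rest).getD (k / 2) 0
            else (x :: y :: rest).getD (2 + rest.length - 1 - k / 2) 0) ∘ (fun k => 2 + k))
          = (List.range t'.length).map (fun k => if k % 2 = 0
            then t'.getD (k / 2) 0 else t'.getD (t'.length - 1 - k / 2) 0) := by
        rw [hm]
        apply List.map_congr_left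
        intro k hk
        rw [List.mem_range] at hk
        simp only [Function.comp]
        have he : (2 + k) % 2 = k % 2 := by omega
        have hd : (2 + k) / 2 = k / 2 + 1 := by omega
        rw [he, hd]
        by_cases hpar : k % 2 = 0
        · rw [if_pos hpar, if_pos hpar, List.getD_cons_succ, hsplit,
            List.getD_append _ _ _ _ (by omega)]
        · rw [if_neg hpar, if_neg hpar]
          have hi : 2 + rest.length - 1 - (k / 2 + 1) = (rest.length - 1 - k / 2) + 1 := by omega
          rw [hi, List.getD_cons_succ, hsplit, List.getD_append _ _ _ _ (by omega)]
      rw [hrest]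
      rfl

lemma pvB_eq_cf (s : List Int) :
    (PySem.List.pyRange 0 (s.length : Int) 1).map (fun i =>
      if PySem.Int.mod i 2 = 0 then PySem.List.pyGetD s (PySem.Int.floordiv i 2) 0
      else PySem.List.pyGetD s ((s.length : Int) - 1 - PySem.Int.floordiv i 2) 0) = pvCF s := by
  rw [PySem.List.pyRange_zero_nat, List.map_map]
  unfold pvCF
  apply List.map_congr_left
  intro k hk
  rw [List.mem_range] at hk
  simp only [Function.comp]
  have hmod : PySem.Int.mod (k:Int) 2 = ((k % 2 : Nat) : Int) := by
    simp [PySem.Int.mod, Int.fmod_eq_emod]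
  have hdiv : PySem.Int.floordiv (k:Int) 2 = ((k/2 : Nat) : Int) := by
    simp [PySem.Int.floordiv, Int.fdiv_eq_ediv]
  rw [hmod, hdiv]
  by_cases hpar : k % 2 = 0
  · rw [if_pos (by exact_mod_cast hpar), if_pos hpar]
    exact PySem.List.pyGetD_natCast s (k/2) 0
  · rw [if_neg (by exact_mod_cast hpar), if_neg hpar]
    have hcast : ((s.length:Int) - 1 - ((k/2 : Nat):Int)) = ((s.length - 1 - k/2 : Nat) : Int) := by
      omega
    rw [hcast]
    exact PySem.List.pyGetD_natCast s (s.length - 1 - k/2) 0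

-- ===== VERDICT (by name: the statement is the Claim_ definition above) =====
theorem alt_sort1_spec : Claim_equal_alt_sort1 := by
  intro arr _
  unfold Spec_alt_sort1
  simp only [alt_sort1, alt_sort1_alt]
  rw [pvB_eq_cf]
  set s := (PySem.List.sorted arr (fun x => x) false).reverse with hs
  have hsl : s.length = arr.length := by
    rw [hs, List.length_reverse, PySem.List.length_sorted]
  by_cases h0 : arr.length = 0
  · have hs0 : s.length = 0 := by omega
    rw [if_pos h0]
    unfold pvCF
    rw [hs0]
    simp
  · rw [if_neg h0]
    have hmid : PySem.Int.floordiv (arr.length : Int) 2 = ((arr.length / 2 : Nat) : Int) := by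
      simp [PySem.Int.floordiv, Int.fdiv_eq_ediv]
    rw [hmid, PySem.List.slice_to_natCast, PySem.List.slice_from_natCast, ← hsl]
    exact pvCF_core s.length s rfl
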